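-- pv_equiv track=rewrite | github.com/binary-0/Algorithms-archive | etc/boj_18222.py | FoldAndFlip
-- ===== SOURCE A (Python) =====
-- def FoldAndFlip(k):
--     if k == 0:
--         return 0
--     elif k == 1:
--         return 1
--     elif k % 2 == 1:
--         return 1 - FoldAndFlip(k//2)
--     else:
--         return FoldAndFlip(k//2)
-- ===== SOURCE B (Python) =====
-- def FoldAndFlip(k):
--     res = 0
--     while k:
--         res ^= k & 1
--         k >>= 1
--     return res
-- ===== Notes on version B (the rewrite author's own statement) =====
-- stated objective: simpler
-- what changed: Replaces the recursive halve-and-flip with an iterative bit loop that XOR-accumulates the low bit while shifting k right (popcount parity), with no recursion and no base-case chain.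
import Mathlib
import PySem

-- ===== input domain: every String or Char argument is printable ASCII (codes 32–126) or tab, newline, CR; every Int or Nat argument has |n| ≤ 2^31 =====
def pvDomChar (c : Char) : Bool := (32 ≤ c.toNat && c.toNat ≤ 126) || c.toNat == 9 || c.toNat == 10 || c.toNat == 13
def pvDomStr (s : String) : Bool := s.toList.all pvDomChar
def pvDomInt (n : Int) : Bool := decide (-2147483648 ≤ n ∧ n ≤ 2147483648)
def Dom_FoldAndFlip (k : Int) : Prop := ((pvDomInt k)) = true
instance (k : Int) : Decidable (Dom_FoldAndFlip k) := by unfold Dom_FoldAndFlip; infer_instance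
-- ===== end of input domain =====

-- B replaces A's recursive halve-and-flip with an iterative XOR-accumulating bit loop (simpler); A raises RecursionError on k < 0, excluded by Pre_.

-- ===== PORT A =====
-- For k ≥ 0 Python's k % 2 and k // 2 coincide with Nat % and /; the recursion is
-- carried out on k.toNat (the negative case, where Python never terminates, is outside Pre_).
def FoldAndFlipGoA : Nat → Int
  | 0 => 0
  | 1 => 1
  | (n+2) => if (n+2) % 2 = 1 then 1 - FoldAndFlipGoA ((n+2)/2) else FoldAndFlipGoA ((n+2)/2)
decreasing_by all_goals exact Nat.div_lt_self (by omega) (by omega)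

def FoldAndFlip (k : Int) : Int :=
  if k < 0 then 0 else FoldAndFlipGoA k.toNat  -- negative k: non-terminating in Python, outside Pre_

-- ===== PORT B =====
-- the while loop of Source B, as structural recursion on the shrinking k (k ≥ 0 via Pre_)
def FoldAndFlipGoB : Nat → Nat → Nat
  | 0, res => res
  | (n+1), res => FoldAndFlipGoB ((n+1)/2) (res ^^^ ((n+1) % 2))
decreasing_by exact Nat.div_lt_self (by omega) (by omega)

def FoldAndFlip_alt (k : Int) : Int :=
  if k < 0 then 0 else (FoldAndFlipGoB k.toNat 0 : Int)

-- ===== PRECONDITION & SPEC =====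
-- Pre_ excludes negative k, where the Python A recurses forever (RecursionError) and B's loop does not terminate.
def Pre_FoldAndFlip (k : Int) : Prop := 0 ≤ k
instance (k : Int) : Decidable (Pre_FoldAndFlip k) := by unfold Pre_FoldAndFlip; infer_instance
def pvWitness_FoldAndFlip : Int := 5

def Spec_FoldAndFlip (k : Int) (out : Int) : Prop := out = FoldAndFlip_alt k
instance (k : Int) (out : Int) : Decidable (Spec_FoldAndFlip k out) := by unfold Spec_FoldAndFlip; infer_instance

-- ===== CLAIM (what is proved, stated in full; the proofs are below) =====
def Claim_equal_FoldAndFlip : Prop := ∀ (k : Int), Dom_FoldAndFlip k → Pre_FoldAndFlip k → Spec_FoldAndFlip k (FoldAndFlip k)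

-- ===== LEMMAS AND PROOFS =====

lemma goB_le (n : Nat) : ∀ res, res ≤ 1 → FoldAndFlipGoB n res ≤ 1 := by
  induction n using Nat.strong_induction_on with
  | _ n ih =>
    intro res hres
    match n with
    | 0 => simpa [FoldAndFlipGoB] using hres
    | (m+1) =>
      rw [FoldAndFlipGoB]
      exact ih ((m+1)/2) (Nat.div_lt_self (by omega) (by omega)) _
        (by rcases Nat.mod_two_eq_zero_or_one (m+1) with h | h <;> interval_cases res <;> simp [h])

lemma goB_xor (n : Nat) : ∀ res, FoldAndFlipGoB n res = res ^^^ FoldAndFlipGoB n 0 := by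
  induction n using Nat.strong_induction_on with
  | _ n ih =>
    intro res
    match n with
    | 0 => simp [FoldAndFlipGoB]
    | (m+1) =>
      rw [FoldAndFlipGoB, FoldAndFlipGoB]
      simp only [Nat.zero_xor]
      rw [ih ((m+1)/2) (Nat.div_lt_self (by omega) (by omega)) (res ^^^ (m+1) % 2),
          ih ((m+1)/2) (Nat.div_lt_self (by omega) (by omega)) ((m+1) % 2)]
      rw [Nat.xor_assoc]

lemma goA_eq_goB (n : Nat) : FoldAndFlipGoA n = (FoldAndFlipGoB n 0 : Int) := by
  induction n using Nat.strong_induction_on with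
  | _ n ih =>
    match n with
    | 0 => simp [FoldAndFlipGoA, FoldAndFlipGoB]
    | 1 => simp [FoldAndFlipGoA, FoldAndFlipGoB]
    | (m+2) =>
      rw [FoldAndFlipGoA, FoldAndFlipGoB, Nat.zero_xor]
      rw [show m+1+1 = m+2 from rfl, goB_xor ((m+2)/2) ((m+2) % 2)]
      have hle : FoldAndFlipGoB ((m+2)/2) 0 ≤ 1 := goB_le _ 0 (by omega)
      have ihh := ih ((m+2)/2) (Nat.div_lt_self (by omega) (by omega))
      interval_cases h : FoldAndFlipGoB ((m+2)/2) 0 <;>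
        rcases Nat.mod_two_eq_zero_or_one (m+2) with h2 | h2 <;>
        simp_all

-- ===== VERDICT (by name: the statement is the Claim_ definition above) =====
theorem FoldAndFlip_spec : Claim_equal_FoldAndFlip := by
  intro k _ hk
  unfold Pre_FoldAndFlip at hk
  unfold Spec_FoldAndFlip FoldAndFlip FoldAndFlip_alt
  rw [if_neg (by omega), if_neg (by omega)]
  exact goA_eq_goB _
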